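-- pv_equiv track=rewrite | github.com/HamedJahantigh-git/legal_chatbot | model/feature_extraction/org_extractor.py | merge_np_chunks
-- ===== SOURCE A (Python) =====
-- def merge_np_chunks(chunked):
--     nps, temp, id = [], '', 0
--
--     while id < len(chunked):
--         chunk = chunked[id]
--         if chunk[1]=='NP':
--             temp = chunk[0]
--             while id<len(chunked)-1 and chunked[id+1][1]=='NP':
--                 temp = temp + ' ' + chunked[id+1][0]
--                 id = id + 1
--
--             else:
--                 nps.append(temp)
--                 temp = ''
--         id= id+1
--
--     return nps
-- ===== SOURCE B (Python) =====
-- def merge_np_chunks(chunked):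
--     nps, run = [], None
--     for c in chunked:
--         if c[1] == 'NP':
--             if run is None:
--                 run = [c[0]]
--             else:
--                 run.append(c[0])
--         else:
--             if run is not None:
--                 nps.append(' '.join(run))
--                 run = None
--     if run is not None:
--         nps.append(' '.join(run))
--     return nps
-- ===== Notes on version B (the rewrite author's own statement) =====
-- stated objective: simpler
-- what changed: Replaces the index-walking outer loop with a nested look-ahead while and repeated string concatenation by a single accumulator pass that collects each NP run in a list and joins it once with ' '.join.
import Mathlib
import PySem

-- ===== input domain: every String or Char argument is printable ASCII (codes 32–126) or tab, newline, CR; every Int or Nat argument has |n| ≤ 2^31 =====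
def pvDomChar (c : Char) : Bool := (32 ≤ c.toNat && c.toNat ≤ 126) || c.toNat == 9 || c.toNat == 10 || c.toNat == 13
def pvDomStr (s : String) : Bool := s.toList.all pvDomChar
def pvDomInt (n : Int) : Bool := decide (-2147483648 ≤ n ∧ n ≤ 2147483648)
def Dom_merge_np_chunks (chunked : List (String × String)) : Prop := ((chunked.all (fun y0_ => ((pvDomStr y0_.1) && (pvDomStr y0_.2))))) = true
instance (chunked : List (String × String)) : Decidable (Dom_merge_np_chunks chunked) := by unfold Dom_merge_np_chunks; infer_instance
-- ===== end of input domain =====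

-- B replaces A's index-walk with nested look-ahead while and repeated string
-- concatenation by one accumulator pass that joins each NP run once.

-- ===== PORT A =====
-- inner loop: while id < len(chunked)-1 and chunked[id+1][1] == 'NP': state (temp, id);
-- fuel (= len(chunked)-id at the call site) only makes the while loop structurally total
def mergeAInner (chunked : List (String × String)) : Nat → Nat → String → String × Nat
  | 0, id, temp => (temp, id)
  | fuel+1, id, temp =>
    if id < chunked.length - 1 ∧ (chunked.getD (id+1) ("", "")).2 = "NP" then
      mergeAInner chunked fuel (id+1) (temp ++ " " ++ (chunked.getD (id+1) ("", "")).1)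
    else (temp, id)

-- outer loop: while id < len(chunked): state (nps, id); temp is local to each NP hit
def mergeAOuter (chunked : List (String × String)) : Nat → Nat → List String → List String
  | 0, _, nps => nps
  | fuel+1, id, nps =>
    if id < chunked.length then
      let chunk := chunked.getD id ("", "")
      if chunk.2 = "NP" then
        let r := mergeAInner chunked (chunked.length - id) id chunk.1
        mergeAOuter chunked fuel (r.2 + 1) (nps ++ [r.1])
      else
        mergeAOuter chunked fuel (id + 1) nps
    else nps

def merge_np_chunks (chunked : List (String × String)) : List String :=
  mergeAOuter chunked chunked.length 0 []

-- ===== PORT B =====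
-- one step of B's for-loop: state (nps, run) with Python's run = None ↝ none
def mergeBStep (st : List String × Option (List String)) (c : String × String) :
    List String × Option (List String) :=
  if c.2 = "NP" then
    match st.2 with
    | none => (st.1, some [c.1])
    | some r => (st.1, some (r ++ [c.1]))
  else
    match st.2 with
    | none => st
    | some r => (st.1 ++ [PySem.Str.join " " r], none)

def merge_np_chunks_alt (chunked : List (String × String)) : List String :=
  let st := chunked.foldl mergeBStep ([], none)
  match st.2 with
  | none => st.1
  | some r => st.1 ++ [PySem.Str.join " " r]

-- ===== PRECONDITION & SPEC =====
def Spec_merge_np_chunks (chunked : List (String × String)) (out : List String) : Prop := out = merge_np_chunks_alt chunked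
instance (chunked : List (String × String)) (out : List String) : Decidable (Spec_merge_np_chunks chunked out) := by unfold Spec_merge_np_chunks; infer_instance

-- ===== CLAIM (what is proved, stated in full; the proofs are below) =====
def Claim_equal_merge_np_chunks : Prop := ∀ (chunked : List (String × String)), Dom_merge_np_chunks chunked → Spec_merge_np_chunks chunked (merge_np_chunks chunked)

-- ===== LEMMAS AND PROOFS =====

-- proof-side normal form of both programs: recursion on the suffix list
def npP (c : String × String) : Bool := c.2 == "NP"

def goA : List (String × String) → List String
  | [] => []
  | c :: rest =>
    if c.2 = "NP" then
      (List.foldl (fun t x => t ++ " " ++ x.1) c.1 (rest.takeWhile npP))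
        :: goA (rest.dropWhile npP)
    else goA rest
termination_by l => l.length
decreasing_by
  · have := List.length_dropWhile_le npP rest
    simp; omega
  · simp

theorem inner_eq (chunked : List (String × String)) :
    ∀ (fuel id : Nat) (temp : String), chunked.length ≤ id + 1 + fuel →
    mergeAInner chunked fuel id temp =
      (List.foldl (fun t x => t ++ " " ++ x.1) temp ((chunked.drop (id+1)).takeWhile npP),
        id + ((chunked.drop (id+1)).takeWhile npP).length) := by
  intro fuel
  induction fuel with
  | zero =>
    intro id temp hf
    have : chunked.drop (id+1) = [] := List.drop_eq_nil_of_le (by omega)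
    simp [mergeAInner, this]
  | succ fuel ih =>
    intro id temp hf
    rw [mergeAInner]
    by_cases h : id < chunked.length - 1 ∧ (chunked.getD (id+1) ("", "")).2 = "NP"
    · rw [if_pos h]
      obtain ⟨h1, h2⟩ := h
      have hlt : id + 1 < chunked.length := by omega
      have hd : chunked.drop (id+1) = chunked.getD (id+1) ("", "") :: chunked.drop (id+1+1) := by
        rw [List.drop_eq_getElem_cons hlt, List.getD_eq_getElem?_getD,
          List.getElem?_eq_getElem hlt]
        rfl
      have hp : npP (chunked.getD (id+1) ("", "")) = true := by
        simp only [npP, beq_iff_eq]; exact h2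
      rw [ih (id+1) _ (by omega), hd]
      simp only [List.takeWhile_cons, hp, if_true, List.foldl_cons, List.length_cons]
      rw [Prod.mk.injEq]
      exact ⟨rfl, by omega⟩
    · rw [if_neg h]
      have hni : (chunked.drop (id+1)).takeWhile npP = [] := by
        cases hq : chunked.drop (id+1) with
        | nil => rfl
        | cons a t =>
          have hlen : 0 < chunked.length - (id+1) := by
            rw [← List.length_drop, hq]; simp
          have ha : chunked.getD (id+1) ("", "") = a := by
            rw [List.getD_eq_getElem?_getD, ← List.head?_drop, hq]; rfl
          have h2 : ¬ a.2 = "NP" := by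
            intro hc
            exact h ⟨by omega, by rw [ha]; exact hc⟩
          have hp : npP a = false := by
            simp only [npP, beq_eq_false_iff_ne, ne_eq]; exact h2
          simp [hp]
      simp [hni]

theorem drop_takeWhile_len (l : List (String × String)) :
    l.drop ((l.takeWhile npP).length) = l.dropWhile npP := by
  calc l.drop ((l.takeWhile npP).length)
      = (l.takeWhile npP ++ l.dropWhile npP).drop ((l.takeWhile npP).length) := by
        rw [List.takeWhile_append_dropWhile]
    _ = l.dropWhile npP := List.drop_left

theorem outer_eq (chunked : List (String × String)) :
    ∀ (fuel id : Nat) (nps : List String), chunked.length ≤ id + fuel →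
    mergeAOuter chunked fuel id nps = nps ++ goA (chunked.drop id) := by
  intro fuel
  induction fuel with
  | zero =>
    intro id nps hf
    have : chunked.drop id = [] := List.drop_eq_nil_of_le (by omega)
    rw [this, goA]
    simp [mergeAOuter]
  | succ fuel ih =>
    intro id nps hf
    rw [mergeAOuter]
    by_cases h : id < chunked.length
    · rw [if_pos h]
      have hd : chunked.drop id = chunked.getD id ("", "") :: chunked.drop (id+1) := by
        rw [List.drop_eq_getElem_cons h, List.getD_eq_getElem?_getD,
          List.getElem?_eq_getElem h]
        rfl
      by_cases hnp : (chunked.getD id ("", "")).2 = "NP"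
      · rw [if_pos hnp]
        have hr := inner_eq chunked (chunked.length - id) id (chunked.getD id ("", "")).1
          (by omega)
        rw [hr, ih _ _ (by omega)]
        have hdrop : chunked.drop
            (id + ((chunked.drop (id+1)).takeWhile npP).length + 1)
            = (chunked.drop (id+1)).dropWhile npP := by
          rw [← drop_takeWhile_len (chunked.drop (id+1)), List.drop_drop]
          congr 1
          omega
        rw [hdrop, hd, goA, if_pos hnp]
        simp
      · rw [if_neg hnp, ih _ _ (by omega), hd, goA, if_neg hnp]
    · rw [if_neg h]
      have : chunked.drop id = [] := List.drop_eq_nil_of_le (by omega)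
      rw [this, goA]
      simp

theorem foldl_sp_assoc (l : List (List Char)) : ∀ a b : List Char,
    a ++ [' '] ++ List.foldl (fun x y => x ++ [' '] ++ y) b l
      = List.foldl (fun x y => x ++ [' '] ++ y) (a ++ [' '] ++ b) l := by
  induction l with
  | nil => intro a b; rfl
  | cons z m ih =>
    intro a b
    rw [List.foldl_cons, List.foldl_cons, ih]
    simp

-- ' '.join on the char-list side equals A's left fold of ' '-separated concatenation
theorem chars_join_foldl (xs : List (List Char)) (t : List Char) :
    PySem.Chars.join [' '] (t :: xs) = List.foldl (fun a b => a ++ [' '] ++ b) t xs := by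
  induction xs generalizing t with
  | nil => exact PySem.Chars.join_singleton ..
  | cons y l ih =>
    rw [PySem.Chars.join_cons_cons, ih, foldl_sp_assoc, List.foldl_cons]

theorem toList_foldl_sp (xs : List String) (t : String) :
    (List.foldl (fun a b => a ++ " " ++ b) t xs).toList
      = List.foldl (fun a b => a ++ [' '] ++ b) t.toList (xs.map String.toList) := by
  induction xs generalizing t with
  | nil => rfl
  | cons y l ih =>
    rw [List.foldl_cons, ih, List.map_cons, List.foldl_cons]
    congr 1
    simp

theorem join_eq_foldl (t : String) (xs : List String) :
    PySem.Str.join " " (t :: xs) = List.foldl (fun a b => a ++ " " ++ b) t xs := by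
  apply String.toList_inj.mp
  have hsep : (" " : String).toList = [' '] := by decide
  rw [toList_foldl_sp, ← chars_join_foldl]
  simp [PySem.Str.join, hsep]

theorem foldlB_some (l : List (String × String)) (nps : List String) (r : List String) :
    List.foldl mergeBStep (nps, some r) l =
      (match l.dropWhile npP with
       | [] => (nps, some (r ++ (l.takeWhile npP).map Prod.fst))
       | _ :: rest' =>
           List.foldl mergeBStep
             (nps ++ [PySem.Str.join " " (r ++ (l.takeWhile npP).map Prod.fst)], none) rest') := by
  induction l generalizing nps r with
  | nil => simp
  | cons c l ih =>
    by_cases hc : c.2 = "NP"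
    · have hcb : npP c = true := by simp only [npP, beq_iff_eq]; exact hc
      have hstep : mergeBStep (nps, some r) c = (nps, some (r ++ [c.1])) := by
        simp [mergeBStep, hc]
      rw [List.foldl_cons, hstep, ih]
      simp [hcb]
    · have hcb : npP c = false := by
        simp only [npP, beq_eq_false_iff_ne, ne_eq]; exact hc
      have hstep : mergeBStep (nps, some r) c = (nps ++ [PySem.Str.join " " r], none) := by
        simp [mergeBStep, hc]
      rw [List.foldl_cons, hstep]
      simp [hcb]

theorem alt_finalize_aux : ∀ (n : Nat) (l : List (String × String)), l.length ≤ n →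
    ∀ nps : List String,
    (match (List.foldl mergeBStep (nps, none) l).2 with
      | none => (List.foldl mergeBStep (nps, none) l).1
      | some r => (List.foldl mergeBStep (nps, none) l).1 ++ [PySem.Str.join " " r])
      = nps ++ goA l := by
  intro n
  induction n with
  | zero =>
    intro l hl nps
    have : l = [] := List.eq_nil_of_length_eq_zero (by omega)
    subst this
    simp [goA]
  | succ n ih =>
    intro l hl nps
    match l with
    | [] => simp [goA]
    | c :: rest =>
      by_cases hc : c.2 = "NP"
      · have hcb : npP c = true := by simp only [npP, beq_iff_eq]; exact hc
        have hstep : mergeBStep (nps, none) c = (nps, some [c.1]) := by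
          simp [mergeBStep, hc]
        rw [List.foldl_cons, hstep, foldlB_some]
        cases hq : rest.dropWhile npP with
        | nil =>
          rw [goA, if_pos hc, hq, goA]
          simp only [List.singleton_append, join_eq_foldl, List.foldl_map]
        | cons d rest' =>
          have hd : npP d = false := by
            have h0 : rest.dropWhile npP ≠ [] := by rw [hq]; simp
            have hh := List.head_dropWhile_not npP h0
            have h1 : (rest.dropWhile npP).head? = some d := by rw [hq]; rfl
            have h2 := List.head?_eq_some_head h0
            rw [h1] at h2
            rwa [← Option.some.inj h2] at hh
          have hlen : rest'.length ≤ n := by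
            have h1 := List.length_dropWhile_le npP rest
            rw [hq] at h1
            simp at hl h1
            omega
          rw [goA, if_pos hc, hq, goA, if_neg (by simpa [npP] using hd)]
          rw [ih rest' hlen]
          simp only [List.singleton_append, join_eq_foldl, List.foldl_map]
          simp
      · have hstep : mergeBStep (nps, none) c = (nps, none) := by
          simp [mergeBStep, hc]
        rw [List.foldl_cons, hstep, goA, if_neg hc]
        exact ih rest (by simp at hl; omega) nps

-- ===== VERDICT (by name: the statement is the Claim_ definition above) =====
theorem merge_np_chunks_spec : Claim_equal_merge_np_chunks := by
  intro chunked _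
  unfold Spec_merge_np_chunks merge_np_chunks merge_np_chunks_alt
  rw [outer_eq chunked chunked.length 0 [] (by omega)]
  simpa using (alt_finalize_aux chunked.length chunked le_rfl []).symm
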